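-- pv_equiv track=rewrite | github.com/svgbogdnn/algorithms-data-structures-IDAS_course- | 4 term/[CONTEST] 1 ' ИСАД АиСД-1 2526. ДЗ 9. Дерево поиска, Д.Д. по неявному '/2.py | ChampagnePapi21
-- ===== SOURCE A (Python) =====
-- def ChampagnePapi21(keys, left, right):
--     n = len(keys)
--     sums = [0] * n
--     stack = [(0, 0)]
--
--     while stack:
--         v, seen = stack.pop()
--         if seen == 1:
--             total = keys[v]
--
--             l = left[v]
--             if l != -1:
--                 total = total + sums[l]
--
--             r = right[v]
--             if r != -1:
--                 total = total + sums[r]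
--
--             sums[v] = total
--         else:
--             stack.append((v, 1))
--
--             r = right[v]
--             if r != -1:
--                 stack.append((r, 0))
--
--             l = left[v]
--             if l != -1:
--                 stack.append((l, 0))
--
--     return sums
-- ===== SOURCE B (Python) =====
-- def ChampagnePapi21(keys, left, right):
--     n = len(keys)
--     sums = [0] * n
--
--     def dfs(v):
--         total = keys[v]
--         l = left[v]
--         if l != -1:
--             total = total + dfs(l)
--         r = right[v]
--         if r != -1:
--             total = total + dfs(r)
--         sums[v] = total
--         return total
--
--     dfs(0)
--     return sums
-- ===== Notes on version B (the rewrite author's own statement) =====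
-- stated objective: alternative
-- what changed: Replaces A's explicit two-phase (node, seen) stack machine over a mutable stack with a direct recursive post-order DFS helper that returns each subtree's total and stores it on the way back up.
-- outside the precondition, e.g. on ChampagnePapi21([1, 2, 3], [-2, -1, -1], [-1, -1, -1]): A returns [3, 2, 0], B returns [3, 2, 0]
import Mathlib
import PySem

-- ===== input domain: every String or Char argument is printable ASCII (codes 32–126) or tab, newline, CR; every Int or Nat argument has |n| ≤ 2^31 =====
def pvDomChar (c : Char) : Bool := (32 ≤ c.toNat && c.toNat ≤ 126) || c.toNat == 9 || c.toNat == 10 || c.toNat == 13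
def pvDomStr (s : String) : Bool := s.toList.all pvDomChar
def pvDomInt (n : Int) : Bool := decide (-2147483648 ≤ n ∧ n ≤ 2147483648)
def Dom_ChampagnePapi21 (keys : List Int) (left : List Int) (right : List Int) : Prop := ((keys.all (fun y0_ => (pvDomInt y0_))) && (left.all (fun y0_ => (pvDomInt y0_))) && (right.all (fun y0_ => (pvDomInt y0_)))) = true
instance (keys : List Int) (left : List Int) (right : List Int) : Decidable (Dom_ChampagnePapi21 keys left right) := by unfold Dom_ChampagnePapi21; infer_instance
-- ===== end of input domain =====

-- B replaces A's explicit two-phase (node, seen) stack machine by a direct recursive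
-- post-order DFS helper; same cost, plainer decomposition (objective: alternative).

-- ===== PORT A =====
-- The while-stack loop becomes fuel recursion; the fuel (4^n + 1) is only a totality
-- guard and is never exhausted on inputs satisfying Pre_.  Indexing keys[v]/left[v]/
-- right[v]/sums[l] uses pyGetD (default 0): exact while indices are nonnegative and in
-- range, which Pre_ guarantees for every access made; sums[v] = total becomes pySetD
-- (exact for 0 ≤ v < len, guaranteed by Pre_).
def pvRunA (keys left right : List Int) : Nat → List Int → List (Int × Int) → List Int
  | _, sums, [] => sums
  | 0, sums, _ :: _ => sums
  | fuel+1, sums, (v, seen) :: stack =>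
    if seen = 1 then
      let total := PySem.List.pyGetD keys v 0
      let l := PySem.List.pyGetD left v 0
      let total := if l ≠ -1 then total + PySem.List.pyGetD sums l 0 else total
      let r := PySem.List.pyGetD right v 0
      let total := if r ≠ -1 then total + PySem.List.pyGetD sums r 0 else total
      pvRunA keys left right fuel (PySem.List.pySetD sums v total) stack
    else
      let st := (v, 1) :: stack
      let r := PySem.List.pyGetD right v 0
      let st := if r ≠ -1 then (r, 0) :: st else st
      let l := PySem.List.pyGetD left v 0
      let st := if l ≠ -1 then (l, 0) :: st else st
      pvRunA keys left right fuel sums st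

def ChampagnePapi21 (keys : List Int) (left : List Int) (right : List Int) : List Int :=
  pvRunA keys left right (4 ^ keys.length + 1) (List.replicate keys.length 0) [(0, 0)]

-- ===== PORT B =====
-- dfs(v) returns (total, sums); the fuel (keys.length at the top call) is only a
-- totality guard, never exhausted under Pre_ since descendant sets strictly shrink.
def pvDfsB (keys left right : List Int) : Nat → Int → List Int → Int × List Int
  | 0, _, sums => (0, sums)
  | fuel+1, v, sums =>
    let t0 := PySem.List.pyGetD keys v 0
    let l := PySem.List.pyGetD left v 0
    let pl := if l ≠ -1 then
        (t0 + (pvDfsB keys left right fuel l sums).1, (pvDfsB keys left right fuel l sums).2)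
      else (t0, sums)
    let r := PySem.List.pyGetD right v 0
    let pr := if r ≠ -1 then
        (pl.1 + (pvDfsB keys left right fuel r pl.2).1, (pvDfsB keys left right fuel r pl.2).2)
      else pl
    (pr.1, PySem.List.pySetD pr.2 v pr.1)

def ChampagnePapi21_alt (keys : List Int) (left : List Int) (right : List Int) : List Int :=
  (pvDfsB keys left right keys.length 0 (List.replicate keys.length 0)).2

-- ===== PRECONDITION & SPEC =====
-- Vocabulary for Pre_: the children of node i, and the standard reachability closure
-- (n-fold iterated child image — a plain graph-theoretic descendant set, not a run of
-- either program's algorithm).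
def pvKids (left right : List Int) (i : Nat) : List Int :=
  [left.getD i 0, right.getD i 0].filter (fun c => c ≠ -1)

def pvStep (left right : List Int) (s : Finset Nat) : Finset Nat :=
  s ∪ s.biUnion (fun i => ((pvKids left right i).map Int.toNat).toFinset)

def pvDesc (left right : List Int) (n : Nat) (i : Nat) : Finset Nat :=
  (pvStep left right)^[n] {i}

-- Pre_ excludes the inputs where A raises (empty keys, a reachable node index beyond
-- left/right, an out-of-range reachable child index) or loops forever (a reachable
-- cycle); as a stated narrowing it also excludes negative reachable child indices
-- other than -1 (on which A returns via Python's negative-index wraparound, and B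
-- agrees with A anyway).
def Pre_ChampagnePapi21 (keys : List Int) (left : List Int) (right : List Int) : Prop :=
  0 < keys.length ∧
  ∀ i ∈ pvDesc left right keys.length 0,
    (left.getD i 0 = -1 ∨ (0 ≤ left.getD i 0 ∧ left.getD i 0 < (keys.length : Int))) ∧
    (right.getD i 0 = -1 ∨ (0 ≤ right.getD i 0 ∧ right.getD i 0 < (keys.length : Int))) ∧
    (left.getD i 0 ≠ -1 → i ∉ pvDesc left right keys.length (left.getD i 0).toNat) ∧
    (right.getD i 0 ≠ -1 → i ∉ pvDesc left right keys.length (right.getD i 0).toNat) ∧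
    i < left.length ∧ i < right.length

instance (keys : List Int) (left : List Int) (right : List Int) : Decidable (Pre_ChampagnePapi21 keys left right) := by
  unfold Pre_ChampagnePapi21; infer_instance

def pvWitness_ChampagnePapi21 : List Int × List Int × List Int :=
  ([5], [-1], [-1])

def Spec_ChampagnePapi21 (keys : List Int) (left : List Int) (right : List Int) (out : List Int) : Prop := out = ChampagnePapi21_alt keys left right
instance (keys : List Int) (left : List Int) (right : List Int) (out : List Int) : Decidable (Spec_ChampagnePapi21 keys left right out) := by unfold Spec_ChampagnePapi21; infer_instance

-- ===== CLAIM (what is proved, stated in full; the proofs are below) =====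
def Claim_equal_ChampagnePapi21 : Prop := ∀ (keys : List Int) (left : List Int) (right : List Int), Dom_ChampagnePapi21 keys left right → Pre_ChampagnePapi21 keys left right → Spec_ChampagnePapi21 keys left right (ChampagnePapi21 keys left right)

-- ===== LEMMAS AND PROOFS =====

-- size of the descendant set: the termination measure of the traversal
def pvM (left right : List Int) (n : Nat) (v : Int) : Nat :=
  (pvDesc left right n v.toNat).card

-- pure subtree-sum value of node v (proof-layer reference value)
def pvS (keys left right : List Int) (v : Int) : Int :=
  (pvDfsB keys left right (pvM left right keys.length v) v []).1

-- stack-entry weight, stack weight and stack well-formedness for A's machine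
def pvWt1 (left right : List Int) (n : Nat) (p : Int × Int) : Nat :=
  if p.2 = 1 then 1 else 4 ^ pvM left right n p.1
def pvWt (left right : List Int) (n : Nat) (st : List (Int × Int)) : Nat :=
  (st.map (pvWt1 left right n)).sum
def pvOK (left right : List Int) (n : Nat) (st : List (Int × Int)) : Prop :=
  ∀ p ∈ st, 0 ≤ p.1 ∧ p.1.toNat ∈ pvDesc left right n 0 ∧ (p.2 = 0 ∨ p.2 = 1)

theorem pvStep_incl (left right : List Int) (s : Finset Nat) : s ⊆ pvStep left right s :=
  Finset.subset_union_left

theorem pvStep_mono (left right : List Int) {s t : Finset Nat} (h : s ⊆ t) :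
    pvStep left right s ⊆ pvStep left right t :=
  Finset.union_subset_union h (Finset.biUnion_subset_biUnion_of_subset_left _ h)

theorem pvIter_le (left right : List Int) (s : Finset Nat) {k m : Nat} (h : k ≤ m) :
    (pvStep left right)^[k] s ⊆ (pvStep left right)^[m] s := by
  induction m, h using Nat.le_induction with
  | base => exact subset_rfl
  | succ m _ ih =>
    rw [Function.iterate_succ_apply']
    exact ih.trans (pvStep_incl left right _)

theorem pvClosed_iter (left right : List Int) {S : Finset Nat} {c : Nat}
    (hS : pvStep left right S = S) (hc : c ∈ S) :
    ∀ k : Nat, (pvStep left right)^[k] {c} ⊆ S := by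
  intro k
  induction k with
  | zero => simpa using hc
  | succ k ih =>
    rw [Function.iterate_succ_apply']
    exact (pvStep_mono left right ih).trans (le_of_eq hS)

theorem pvStab (left right : List Int) (n i : Nat)
    (hb : ∀ k, k ≤ n → (pvStep left right)^[k] {i} ⊆ Finset.range n) :
    pvStep left right ((pvStep left right)^[n] {i}) = (pvStep left right)^[n] {i} := by
  have key : ∀ k : Nat, (pvStep left right)^[k+1] {i} = (pvStep left right)^[k] {i} ∨
      k + 1 ≤ ((pvStep left right)^[k] {i}).card := by
    intro k
    induction k with
    | zero => right; simp
    | succ k ih =>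
      rcases ih with he | hc
      · left
        calc (pvStep left right)^[k+1+1] {i}
            = pvStep left right ((pvStep left right)^[k+1] {i}) :=
              Function.iterate_succ_apply' _ _ _
          _ = pvStep left right ((pvStep left right)^[k] {i}) := by rw [he]
          _ = (pvStep left right)^[k+1] {i} := (Function.iterate_succ_apply' _ _ _).symm
      · by_cases heq : (pvStep left right)^[k+1+1] {i} = (pvStep left right)^[k+1] {i}
        · left; exact heq
        · right
          by_cases heq2 : (pvStep left right)^[k+1] {i} = (pvStep left right)^[k] {i}
          · have hstep : (pvStep left right)^[k+1+1] {i} = (pvStep left right)^[k+1] {i} := by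
              calc (pvStep left right)^[k+1+1] {i}
                  = pvStep left right ((pvStep left right)^[k+1] {i}) :=
                    Function.iterate_succ_apply' _ _ _
                _ = pvStep left right ((pvStep left right)^[k] {i}) := by rw [heq2]
                _ = (pvStep left right)^[k+1] {i} :=
                    (Function.iterate_succ_apply' _ _ _).symm
            exact absurd hstep heq
          · have hss : (pvStep left right)^[k] {i} ⊂ (pvStep left right)^[k+1] {i} :=
              ⟨pvIter_le left right _ (Nat.le_succ k),
               fun h => heq2 (Finset.Subset.antisymm h (pvIter_le left right _ (Nat.le_succ k)))⟩
            have := Finset.card_lt_card hss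
            omega
  rcases key n with he | hc
  · rw [← Function.iterate_succ_apply' (pvStep left right) n]; exact he
  · have h1 := Finset.card_le_card (hb n le_rfl)
    rw [Finset.card_range] at h1
    omega

theorem pv_bound (keys left right : List Int) (hp : Pre_ChampagnePapi21 keys left right) :
    ∀ k, k ≤ keys.length →
      (pvStep left right)^[k] {0} ⊆ Finset.range keys.length := by
  obtain ⟨hn, hch⟩ := hp
  intro k
  induction k with
  | zero => intro hk; simpa using hn
  | succ k ih =>
    intro hk
    rw [Function.iterate_succ_apply']
    intro x hx
    rcases Finset.mem_union.mp hx with hx | hx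
    · exact ih (by omega) hx
    · obtain ⟨i, hi, hxk⟩ := Finset.mem_biUnion.mp hx
      have hiR : i ∈ pvDesc left right keys.length 0 :=
        pvIter_le left right {0} (show k ≤ keys.length by omega) hi
      simp only [List.mem_toFinset, List.mem_map] at hxk
      obtain ⟨c, hc, rfl⟩ := hxk
      have h := hch i hiR
      simp only [pvKids, List.mem_filter, List.mem_cons,
        decide_eq_true_eq] at hc
      simp only [List.getD_eq_getElem?_getD] at h hc
      obtain ⟨hc1, hc2⟩ := hc
      rcases hc1 with rfl | hc1
      · rcases h.1 with h' | h'
        · exact absurd h' hc2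
        · exact Finset.mem_range.mpr (by omega)
      · rcases hc1 with rfl | hfalse
        · rcases h.2.1 with h' | h'
          · exact absurd h' hc2
          · exact Finset.mem_range.mpr (by omega)
        · cases hfalse

theorem pvR_closed (keys left right : List Int) (hp : Pre_ChampagnePapi21 keys left right) :
    pvStep left right (pvDesc left right keys.length 0) = pvDesc left right keys.length 0 :=
  pvStab left right keys.length 0 (pv_bound keys left right hp)

theorem pvR_sub (keys left right : List Int) (hp : Pre_ChampagnePapi21 keys left right) :
    pvDesc left right keys.length 0 ⊆ Finset.range keys.length :=
  pv_bound keys left right hp keys.length le_rfl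

theorem pvDesc_self (left right : List Int) (n i : Nat) : i ∈ pvDesc left right n i :=
  pvIter_le left right {i} (Nat.zero_le n) (by simp)

theorem pvDesc_sub_R (keys left right : List Int) (hp : Pre_ChampagnePapi21 keys left right)
    {i : Nat} (hi : i ∈ pvDesc left right keys.length 0) :
    pvDesc left right keys.length i ⊆ pvDesc left right keys.length 0 :=
  pvClosed_iter left right (pvR_closed keys left right hp) hi keys.length

theorem pvDesc_closed (keys left right : List Int) (hp : Pre_ChampagnePapi21 keys left right)
    {i : Nat} (hi : i ∈ pvDesc left right keys.length 0) :
    pvStep left right (pvDesc left right keys.length i) = pvDesc left right keys.length i :=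
  pvStab left right keys.length i (fun k _ =>
    (pvClosed_iter left right (pvR_closed keys left right hp) hi k).trans
      (pvR_sub keys left right hp))

theorem pvKid_mem_desc (keys left right : List Int)
    (hp : Pre_ChampagnePapi21 keys left right) {i : Nat} {c : Int}
    (hc : c ∈ pvKids left right i) :
    c.toNat ∈ pvDesc left right keys.length i := by
  have h1 : c.toNat ∈ (pvStep left right)^[1] {i} := by
    simp only [Function.iterate_one, pvStep, Finset.mem_union]
    right
    exact Finset.mem_biUnion.mpr ⟨i, by simp, by
      simp only [List.mem_toFinset, List.mem_map]; exact ⟨c, hc, rfl⟩⟩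
  exact pvIter_le left right {i} (show 1 ≤ keys.length from hp.1) h1

theorem pvM_lt (keys left right : List Int) (hp : Pre_ChampagnePapi21 keys left right)
    {i : Nat} {c : Int} (hi : i ∈ pvDesc left right keys.length 0)
    (hc : c ∈ pvKids left right i)
    (hacyc : i ∉ pvDesc left right keys.length c.toNat) :
    (pvDesc left right keys.length c.toNat).card < (pvDesc left right keys.length i).card := by
  apply Finset.card_lt_card
  constructor
  · exact pvClosed_iter left right (pvDesc_closed keys left right hp hi)
      (pvKid_mem_desc keys left right hp hc) keys.length
  · intro hcontra
    exact hacyc (hcontra (pvDesc_self left right keys.length i))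

theorem pvM_pos (left right : List Int) (n : Nat) (v : Int) :
    1 ≤ pvM left right n v :=
  Finset.card_pos.mpr ⟨v.toNat, pvDesc_self left right n v.toNat⟩

theorem pvM_le (keys left right : List Int) (hp : Pre_ChampagnePapi21 keys left right)
    {v : Int} (hv : v.toNat ∈ pvDesc left right keys.length 0) :
    pvM left right keys.length v ≤ keys.length := by
  have h1 : pvDesc left right keys.length v.toNat ⊆ Finset.range keys.length :=
    (pvDesc_sub_R keys left right hp hv).trans (pvR_sub keys left right hp)
  have := Finset.card_le_card h1
  simpa [pvM, Finset.card_range] using this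

-- children of an in-range reachable node, read the way the ports read them
theorem pv_children (keys left right : List Int)
    (hp : Pre_ChampagnePapi21 keys left right) (v : Int)
    (h0 : 0 ≤ v) (hvR : v.toNat ∈ pvDesc left right keys.length 0) :
    (PySem.List.pyGetD left v 0 = -1 ∨
      (0 ≤ PySem.List.pyGetD left v 0 ∧ PySem.List.pyGetD left v 0 < (keys.length : Int) ∧
        (PySem.List.pyGetD left v 0).toNat ∈ pvDesc left right keys.length 0 ∧
        pvM left right keys.length (PySem.List.pyGetD left v 0) < pvM left right keys.length v)) ∧
    (PySem.List.pyGetD right v 0 = -1 ∨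
      (0 ≤ PySem.List.pyGetD right v 0 ∧ PySem.List.pyGetD right v 0 < (keys.length : Int) ∧
        (PySem.List.pyGetD right v 0).toNat ∈ pvDesc left right keys.length 0 ∧
        pvM left right keys.length (PySem.List.pyGetD right v 0) < pvM left right keys.length v)) := by
  have e1 : PySem.List.pyGetD left v 0 = left.getD v.toNat 0 :=
    PySem.List.pyGetD_of_nonneg left 0 h0
  have e2 : PySem.List.pyGetD right v 0 = right.getD v.toNat 0 :=
    PySem.List.pyGetD_of_nonneg right 0 h0
  have h := hp.2 v.toNat hvR
  rw [e1, e2]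
  constructor
  · rcases h.1 with h' | h'
    · exact Or.inl h'
    · by_cases hne : left.getD v.toNat 0 = -1
      · exact Or.inl hne
      · have hkid : left.getD v.toNat 0 ∈ pvKids left right v.toNat := by
          unfold pvKids
          exact List.mem_filter.mpr ⟨by simp, by simpa using hne⟩
        have hacyc := h.2.2.1 hne
        refine Or.inr ⟨h'.1, h'.2, ?_, ?_⟩
        · exact pvDesc_sub_R keys left right hp hvR
            (pvKid_mem_desc keys left right hp hkid)
        · exact pvM_lt keys left right hp hvR hkid hacyc
  · rcases h.2.1 with h' | h'
    · exact Or.inl h'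
    · by_cases hne : right.getD v.toNat 0 = -1
      · exact Or.inl hne
      · have hkid : right.getD v.toNat 0 ∈ pvKids left right v.toNat := by
          unfold pvKids
          exact List.mem_filter.mpr ⟨by simp, by simpa using hne⟩
        have hacyc := h.2.2.2.1 hne
        refine Or.inr ⟨h'.1, h'.2, ?_, ?_⟩
        · exact pvDesc_sub_R keys left right hp hvR
            (pvKid_mem_desc keys left right hp hkid)
        · exact pvM_lt keys left right hp hvR hkid hacyc

theorem pvWt1_pos (left right : List Int) (n : Nat) (p : Int × Int) :
    1 ≤ pvWt1 left right n p := by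
  unfold pvWt1; split
  · exact le_refl 1
  · exact Nat.one_le_pow _ _ (by norm_num)

theorem pvWt_cons (left right : List Int) (n : Nat) (p : Int × Int) (st : List (Int × Int)) :
    pvWt left right n (p :: st) = pvWt1 left right n p + pvWt left right n st := by
  simp [pvWt]

theorem pv_pow_ineq (k : Nat) (hk : 1 ≤ k) : 2 * 4 ^ (k - 1) + 2 ≤ 4 ^ k := by
  obtain ⟨m, rfl⟩ : ∃ m, k = m + 1 := ⟨k - 1, by omega⟩
  have h1 : 1 ≤ 4 ^ m := Nat.one_le_pow _ _ (by norm_num)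
  have h2 : 4 ^ (m + 1) = 4 ^ m * 4 := pow_succ 4 m
  simp only [Nat.add_sub_cancel]
  omega

-- the returned total of B's dfs never reads the array
theorem pvDfsB_fst_indep (keys left right : List Int) :
    ∀ (fuel : Nat) (v : Int) (a : List Int),
      (pvDfsB keys left right fuel v a).1 = (pvDfsB keys left right fuel v []).1 := by
  intro fuel
  induction fuel with
  | zero => intro v a; simp [pvDfsB]
  | succ f ih =>
    intro v a
    simp only [pvDfsB]
    by_cases hl : PySem.List.pyGetD left v 0 ≠ -1 <;>
      by_cases hr : PySem.List.pyGetD right v 0 ≠ -1 <;>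
        simp [hl, hr, ih]

theorem pvDfsB_length (keys left right : List Int) :
    ∀ (fuel : Nat) (v : Int) (a : List Int),
      (pvDfsB keys left right fuel v a).2.length = a.length := by
  intro fuel
  induction fuel with
  | zero => intro v a; simp [pvDfsB]
  | succ f ih =>
    intro v a
    simp only [pvDfsB]
    by_cases hl : PySem.List.pyGetD left v 0 ≠ -1 <;>
      by_cases hr : PySem.List.pyGetD right v 0 ≠ -1 <;>
        simp [hl, hr, ih, PySem.List.length_pySetD]

-- fuel irrelevance for B's dfs, once sufficient
theorem pvDfsB_mono (keys left right : List Int)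
    (hp : Pre_ChampagnePapi21 keys left right) :
    ∀ (f g : Nat) (v : Int) (a : List Int), 0 ≤ v →
      v.toNat ∈ pvDesc left right keys.length 0 →
      pvM left right keys.length v ≤ f → pvM left right keys.length v ≤ g →
      pvDfsB keys left right f v a = pvDfsB keys left right g v a := by
  intro f
  induction f with
  | zero =>
    intro g v a h0 hv hf hg
    have := pvM_pos left right keys.length v
    omega
  | succ f ih =>
    intro g v a h0 hv hf hg
    have hM1 := pvM_pos left right keys.length v
    obtain ⟨g', rfl⟩ : ∃ g', g = g' + 1 := ⟨g - 1, by omega⟩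
    obtain ⟨hcl, hcr⟩ := pv_children keys left right hp v h0 hv
    simp only [pvDfsB]
    by_cases hl : PySem.List.pyGetD left v 0 ≠ -1 <;>
      by_cases hr : PySem.List.pyGetD right v 0 ≠ -1
    · obtain ⟨hl0, hln, hlR, hlM⟩ := hcl.resolve_left hl
      obtain ⟨hr0, hrn, hrR, hrM⟩ := hcr.resolve_left hr
      simp [hl, hr]
      rw [ih g' (PySem.List.pyGetD left v 0) a hl0 hlR (by omega) (by omega)]
      rw [ih g' (PySem.List.pyGetD right v 0) _ hr0 hrR (by omega) (by omega)]
      exact ⟨rfl, rfl⟩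
    · obtain ⟨hl0, hln, hlR, hlM⟩ := hcl.resolve_left hl
      simp [hl, hr]
      rw [ih g' (PySem.List.pyGetD left v 0) a hl0 hlR (by omega) (by omega)]
      exact ⟨rfl, rfl⟩
    · obtain ⟨hr0, hrn, hrR, hrM⟩ := hcr.resolve_left hr
      simp [hl, hr]
      rw [ih g' (PySem.List.pyGetD right v 0) a hr0 hrR (by omega) (by omega)]
      exact ⟨rfl, rfl⟩
    · simp [hl, hr]

-- the total returned by dfs at sufficient fuel is the pure value pvS
theorem pvS_eq (keys left right : List Int) (hp : Pre_ChampagnePapi21 keys left right)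
    (f : Nat) (v : Int) (a : List Int) (h0 : 0 ≤ v)
    (hv : v.toNat ∈ pvDesc left right keys.length 0)
    (hf : pvM left right keys.length v ≤ f) :
    (pvDfsB keys left right f v a).1 = pvS keys left right v := by
  unfold pvS
  rw [pvDfsB_fst_indep]
  rw [pvDfsB_mono keys left right hp f (pvM left right keys.length v) v [] h0 hv hf (le_refl _)]

-- after dfs at v, position v of the array holds pvS v
theorem pvDfsB_self (keys left right : List Int) (hp : Pre_ChampagnePapi21 keys left right)
    (f : Nat) (v : Int) (a : List Int) (h0 : 0 ≤ v)
    (hv : v.toNat ∈ pvDesc left right keys.length 0)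
    (hf : pvM left right keys.length v ≤ f) (ha : a.length = keys.length) :
    (pvDfsB keys left right f v a).2[v.toNat]? = some (pvS keys left right v) := by
  have hvn : v.toNat < keys.length :=
    Finset.mem_range.mp (pvR_sub keys left right hp hv)
  have hM1 := pvM_pos left right keys.length v
  obtain ⟨f', rfl⟩ : ∃ f', f = f' + 1 := ⟨f - 1, by omega⟩
  have hfst := pvS_eq keys left right hp (f' + 1) v a h0 hv hf
  have hlen : (pvDfsB keys left right (f' + 1) v a).2.length = keys.length := by
    rw [pvDfsB_length]; exact ha
  conv at hfst => lhs; simp only [pvDfsB]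
  conv at hlen => lhs; simp only [pvDfsB]
  simp only [pvDfsB]
  rw [PySem.List.pySetD_of_nonneg _ _ h0] at hlen ⊢
  rw [List.getElem?_set_self (by rw [List.length_set] at hlen; omega)]
  rw [hfst]

-- dfs only rewrites array entries, each with its own pure value
theorem pvDfsB_frame (keys left right : List Int) (hp : Pre_ChampagnePapi21 keys left right) :
    ∀ (f : Nat) (v : Int) (a : List Int) (j : Nat), 0 ≤ v →
      v.toNat ∈ pvDesc left right keys.length 0 →
      pvM left right keys.length v ≤ f → a.length = keys.length →
      (pvDfsB keys left right f v a).2[j]? = a[j]? ∨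
        (pvDfsB keys left right f v a).2[j]? = some (pvS keys left right (j : Int)) := by
  intro f
  induction f with
  | zero =>
    intro v a j h0 hv hf ha
    have := pvM_pos left right keys.length v
    omega
  | succ f ih =>
    intro v a j h0 hv hf ha
    by_cases hj : j = v.toNat
    · subst hj
      right
      rw [pvDfsB_self keys left right hp (f + 1) v a h0 hv hf ha]
      rw [Int.toNat_of_nonneg h0]
    · obtain ⟨hcl, hcr⟩ := pv_children keys left right hp v h0 hv
      have key : ∀ b : List Int, b.length = keys.length →
          ((PySem.List.pySetD b v (pvDfsB keys left right (f+1) v a).1)[j]? = b[j]?) := by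
        intro b hb
        rw [PySem.List.pySetD_of_nonneg _ _ h0]
        exact List.getElem?_set_ne (by omega)
      -- chain the two (optional) child calls
      by_cases hl : PySem.List.pyGetD left v 0 ≠ -1 <;>
        by_cases hr : PySem.List.pyGetD right v 0 ≠ -1
      · obtain ⟨hl0, hln, hlR, hlM⟩ := hcl.resolve_left hl
        obtain ⟨hr0, hrn, hrR, hrM⟩ := hcr.resolve_left hr
        have e : (pvDfsB keys left right (f+1) v a).2 =
            PySem.List.pySetD
              (pvDfsB keys left right f (PySem.List.pyGetD right v 0)
                (pvDfsB keys left right f (PySem.List.pyGetD left v 0) a).2).2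
              v (pvDfsB keys left right (f+1) v a).1 := by
          conv => lhs; simp only [pvDfsB]
          conv => rhs; rw [(by simp only [pvDfsB] : (pvDfsB keys left right (f+1) v a) = (pvDfsB keys left right (f+1) v a))]
          simp only [pvDfsB]
          simp [hl, hr]
        rw [e, key _ (by rw [pvDfsB_length, pvDfsB_length]; exact ha)]
        have hstep1 := ih (PySem.List.pyGetD left v 0) a j hl0 hlR (by omega) ha
        have hstep2 := ih (PySem.List.pyGetD right v 0)
          (pvDfsB keys left right f (PySem.List.pyGetD left v 0) a).2 j
          hr0 hrR (by omega) (by rw [pvDfsB_length]; exact ha)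
        rcases hstep2 with h' | h'
        · rw [h']; exact hstep1
        · right; exact h'
      · obtain ⟨hl0, hln, hlR, hlM⟩ := hcl.resolve_left hl
        have e : (pvDfsB keys left right (f+1) v a).2 =
            PySem.List.pySetD
              (pvDfsB keys left right f (PySem.List.pyGetD left v 0) a).2
              v (pvDfsB keys left right (f+1) v a).1 := by
          conv => lhs; simp only [pvDfsB]
          conv => rhs; simp only [pvDfsB]
          simp [hl, hr]
        rw [e, key _ (by rw [pvDfsB_length]; exact ha)]
        exact ih (PySem.List.pyGetD left v 0) a j hl0 hlR (by omega) ha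
      · obtain ⟨hr0, hrn, hrR, hrM⟩ := hcr.resolve_left hr
        have e : (pvDfsB keys left right (f+1) v a).2 =
            PySem.List.pySetD
              (pvDfsB keys left right f (PySem.List.pyGetD right v 0) a).2
              v (pvDfsB keys left right (f+1) v a).1 := by
          conv => lhs; simp only [pvDfsB]
          conv => rhs; simp only [pvDfsB]
          simp [hl, hr]
        rw [e, key _ (by rw [pvDfsB_length]; exact ha)]
        exact ih (PySem.List.pyGetD right v 0) a j hr0 hrR (by omega) ha
      · have e : (pvDfsB keys left right (f+1) v a).2 =
            PySem.List.pySetD a v (pvDfsB keys left right (f+1) v a).1 := by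
          conv => lhs; simp only [pvDfsB]
          conv => rhs; simp only [pvDfsB]
          simp [hl, hr]
        rw [e, key _ ha]
        left; rfl

theorem pvRunA_nil (keys left right : List Int) (a : List Int) :
    ∀ f : Nat, pvRunA keys left right f a [] = a := by
  intro f; cases f <;> rfl

-- fuel irrelevance for A's stack machine, once the stack weight fits
theorem pvRunA_mono (keys left right : List Int) (hp : Pre_ChampagnePapi21 keys left right) :
    ∀ (f g : Nat) (a : List Int) (st : List (Int × Int)), pvOK left right keys.length st →
      pvWt left right keys.length st ≤ f → pvWt left right keys.length st ≤ g →
      pvRunA keys left right f a st = pvRunA keys left right g a st := by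
  intro f
  induction f with
  | zero =>
    intro g a st hok hf hg
    cases st with
    | nil => rw [pvRunA_nil, pvRunA_nil]
    | cons p rest => have := pvWt1_pos left right keys.length p; rw [pvWt_cons] at hf; omega
  | succ f ih =>
    intro g a st hok hf hg
    cases st with
    | nil => rw [pvRunA_nil, pvRunA_nil]
    | cons p rest =>
      obtain ⟨v, s⟩ := p
      have hw1 := pvWt1_pos left right keys.length (v, s)
      rw [pvWt_cons] at hf hg
      obtain ⟨g', rfl⟩ : ∃ g', g = g' + 1 := ⟨g - 1, by omega⟩
      obtain ⟨h0, hvR, hs⟩ := hok (v, s) (List.mem_cons_self)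
      have hoktl : pvOK left right keys.length rest := fun q hq => hok q (List.mem_cons_of_mem _ hq)
      simp only [pvRunA]
      by_cases hs1 : s = 1
      · simp only [hs1, if_pos]
        have hw1' : pvWt1 left right keys.length (v, s) = 1 := by unfold pvWt1; simp [hs1]
        exact ih g' _ rest hoktl (by omega) (by omega)
      · simp only [if_neg hs1]
        obtain ⟨hcl, hcr⟩ := pv_children keys left right hp v h0 hvR
        have hw1' : pvWt1 left right keys.length (v, s) = 4 ^ pvM left right keys.length v := by
          unfold pvWt1; simp [hs1]
        have hk1 := pvM_pos left right keys.length v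
        have hkey := pv_pow_ineq (pvM left right keys.length v) hk1
        by_cases hl : PySem.List.pyGetD left v 0 ≠ -1 <;>
          by_cases hr : PySem.List.pyGetD right v 0 ≠ -1 <;>
          simp only [hl, hr, if_pos, if_neg, ite_true, ite_false, not_true, not_false_iff,
            ne_eq, not_not, ite_not]
        · obtain ⟨hl0, hln, hlR, hlM⟩ := hcl.resolve_left hl
          obtain ⟨hr0, hrn, hrR, hrM⟩ := hcr.resolve_left hr
          have hbl : 4 ^ pvM left right keys.length (PySem.List.pyGetD left v 0) ≤
              4 ^ (pvM left right keys.length v - 1) :=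
            Nat.pow_le_pow_right (by norm_num) (by omega)
          have hbr : 4 ^ pvM left right keys.length (PySem.List.pyGetD right v 0) ≤
              4 ^ (pvM left right keys.length v - 1) :=
            Nat.pow_le_pow_right (by norm_num) (by omega)
          refine ih g' a _ ?_ ?_ ?_
          · intro q hq
            simp only [List.mem_cons] at hq
            rcases hq with rfl | rfl | rfl | hq
            · exact ⟨hl0, hlR, Or.inl rfl⟩
            · exact ⟨hr0, hrR, Or.inl rfl⟩
            · exact ⟨h0, hvR, Or.inr rfl⟩
            · exact hok q (List.mem_cons_of_mem _ hq)
          all_goals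
            simp only [pvWt_cons]
            have e1 : pvWt1 left right keys.length (PySem.List.pyGetD left v 0, 0) =
                4 ^ pvM left right keys.length (PySem.List.pyGetD left v 0) := by unfold pvWt1; simp
            have e2 : pvWt1 left right keys.length (PySem.List.pyGetD right v 0, 0) =
                4 ^ pvM left right keys.length (PySem.List.pyGetD right v 0) := by unfold pvWt1; simp
            have e3 : pvWt1 left right keys.length (v, 1) = 1 := by unfold pvWt1; simp
            omega
        · obtain ⟨hl0, hln, hlR, hlM⟩ := hcl.resolve_left hl
          have hbl : 4 ^ pvM left right keys.length (PySem.List.pyGetD left v 0) ≤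
              4 ^ (pvM left right keys.length v - 1) :=
            Nat.pow_le_pow_right (by norm_num) (by omega)
          refine ih g' a _ ?_ ?_ ?_
          · intro q hq
            simp only [List.mem_cons] at hq
            rcases hq with rfl | rfl | hq
            · exact ⟨hl0, hlR, Or.inl rfl⟩
            · exact ⟨h0, hvR, Or.inr rfl⟩
            · exact hok q (List.mem_cons_of_mem _ hq)
          all_goals
            simp only [pvWt_cons]
            have e1 : pvWt1 left right keys.length (PySem.List.pyGetD left v 0, 0) =
                4 ^ pvM left right keys.length (PySem.List.pyGetD left v 0) := by unfold pvWt1; simp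
            have e3 : pvWt1 left right keys.length (v, 1) = 1 := by unfold pvWt1; simp
            omega
        · obtain ⟨hr0, hrn, hrR, hrM⟩ := hcr.resolve_left hr
          have hbr : 4 ^ pvM left right keys.length (PySem.List.pyGetD right v 0) ≤
              4 ^ (pvM left right keys.length v - 1) :=
            Nat.pow_le_pow_right (by norm_num) (by omega)
          refine ih g' a _ ?_ ?_ ?_
          · intro q hq
            simp only [List.mem_cons] at hq
            rcases hq with rfl | rfl | hq
            · exact ⟨hr0, hrR, Or.inl rfl⟩
            · exact ⟨h0, hvR, Or.inr rfl⟩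
            · exact hok q (List.mem_cons_of_mem _ hq)
          all_goals
            simp only [pvWt_cons]
            have e2 : pvWt1 left right keys.length (PySem.List.pyGetD right v 0, 0) =
                4 ^ pvM left right keys.length (PySem.List.pyGetD right v 0) := by unfold pvWt1; simp
            have e3 : pvWt1 left right keys.length (v, 1) = 1 := by unfold pvWt1; simp
            omega
        · refine ih g' a _ ?_ ?_ ?_
          · intro q hq
            simp only [List.mem_cons] at hq
            rcases hq with rfl | hq
            · exact ⟨h0, hvR, Or.inr rfl⟩
            · exact hok q (List.mem_cons_of_mem _ hq)
          all_goals
            simp only [pvWt_cons]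
            have e3 : pvWt1 left right keys.length (v, 1) = 1 := by unfold pvWt1; simp
            omega

-- the key bridge: popping (v,0) with enough fuel behaves like running B's dfs at v
theorem pvRunA_dfs (keys left right : List Int) (hp : Pre_ChampagnePapi21 keys left right) :
    ∀ (k : Nat) (v : Int) (a : List Int) (rest : List (Int × Int)) (f : Nat),
      0 ≤ v → v.toNat ∈ pvDesc left right keys.length 0 →
      pvM left right keys.length v ≤ k →
      pvOK left right keys.length rest → a.length = keys.length →
      pvWt left right keys.length ((v, 0) :: rest) ≤ f →
      pvRunA keys left right f a ((v, 0) :: rest) =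
        pvRunA keys left right f
          ((pvDfsB keys left right (pvM left right keys.length v) v a).2) rest := by
  intro k
  induction k with
  | zero =>
    intro v a rest f h0 hv hk
    have := pvM_pos left right keys.length v
    omega
  | succ k ih =>
    intro v a rest f h0 hv hk hok ha hf
    obtain ⟨hcl, hcr⟩ := pv_children keys left right hp v h0 hv
    have hM1 := pvM_pos left right keys.length v
    have hwv : pvWt1 left right keys.length (v, 0) = 4 ^ pvM left right keys.length v := by
      unfold pvWt1; simp
    have hW1 : pvWt1 left right keys.length (v, 1) = 1 := by unfold pvWt1; simp
    have h4 : 4 ^ 1 ≤ 4 ^ pvM left right keys.length v :=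
      Nat.pow_le_pow_right (by norm_num) (by omega)
    have hkey := pv_pow_ineq (pvM left right keys.length v) (by omega)
    rw [pvWt_cons, hwv] at hf
    obtain ⟨f'', hfm⟩ : ∃ f'', f = f'' + 1 + 1 := ⟨f - 2, by omega⟩
    subst hfm
    obtain ⟨m, hm⟩ : ∃ m, pvM left right keys.length v = m + 1 := ⟨pvM left right keys.length v - 1, by omega⟩
    have step2 : ∀ (b : List Int) (ff : Nat),
        pvRunA keys left right (ff + 1) b ((v, 1) :: rest) =
          pvRunA keys left right ff
            (PySem.List.pySetD b v
              (((if PySem.List.pyGetD left v 0 ≠ -1 then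
                    PySem.List.pyGetD keys v 0 +
                      PySem.List.pyGetD b (PySem.List.pyGetD left v 0) 0
                  else PySem.List.pyGetD keys v 0) +
                  (if PySem.List.pyGetD right v 0 ≠ -1 then
                    PySem.List.pyGetD b (PySem.List.pyGetD right v 0) 0 else 0)))) rest := by
      intro b ff
      rw [pvRunA, if_pos rfl]
      by_cases hl : PySem.List.pyGetD left v 0 ≠ -1 <;>
        by_cases hr : PySem.List.pyGetD right v 0 ≠ -1 <;> simp [hl, hr]
    by_cases hl : PySem.List.pyGetD left v 0 ≠ -1 <;>
      by_cases hr : PySem.List.pyGetD right v 0 ≠ -1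
    -- case l ≠ -1, r ≠ -1
    · obtain ⟨hl0, hLn, hlR, hlM⟩ := hcl.resolve_left hl
      obtain ⟨hr0, hRn, hrR, hrM⟩ := hcr.resolve_left hr
      have hWL : pvWt1 left right keys.length (PySem.List.pyGetD left v 0, 0) =
          4 ^ pvM left right keys.length (PySem.List.pyGetD left v 0) := by unfold pvWt1; simp
      have hWR : pvWt1 left right keys.length (PySem.List.pyGetD right v 0, 0) =
          4 ^ pvM left right keys.length (PySem.List.pyGetD right v 0) := by unfold pvWt1; simp
      have hbl : 4 ^ pvM left right keys.length (PySem.List.pyGetD left v 0) ≤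
          4 ^ (pvM left right keys.length v - 1) := Nat.pow_le_pow_right (by norm_num) (by omega)
      have hbr : 4 ^ pvM left right keys.length (PySem.List.pyGetD right v 0) ≤
          4 ^ (pvM left right keys.length v - 1) := Nat.pow_le_pow_right (by norm_num) (by omega)
      have step0 : pvRunA keys left right (f'' + 1 + 1) a ((v, 0) :: rest) =
          pvRunA keys left right (f'' + 1) a
            ((PySem.List.pyGetD left v 0, 0) :: (PySem.List.pyGetD right v 0, 0) ::
              (v, 1) :: rest) := by
        rw [pvRunA, if_neg (by decide : ¬ ((0 : Int) = 1))]
        simp [hl, hr]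
      rw [step0]
      rw [ih (PySem.List.pyGetD left v 0) a ((PySem.List.pyGetD right v 0, 0) :: (v, 1) :: rest)
          (f'' + 1) hl0 hlR (by omega)
          (by
            intro q hq
            simp only [List.mem_cons] at hq
            rcases hq with rfl | rfl | hq
            · exact ⟨hr0, hrR, Or.inl rfl⟩
            · exact ⟨h0, hv, Or.inr rfl⟩
            · exact hok q hq)
          ha
          (by simp only [pvWt_cons, hWL, hWR, hW1]; omega)]
      rw [ih (PySem.List.pyGetD right v 0) _ ((v, 1) :: rest) (f'' + 1)
          hr0 hrR (by omega)
          (by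
            intro q hq
            simp only [List.mem_cons] at hq
            rcases hq with rfl | hq
            · exact ⟨h0, hv, Or.inr rfl⟩
            · exact hok q hq)
          (by rw [pvDfsB_length]; exact ha)
          (by simp only [pvWt_cons, hWR, hW1]; omega)]
      rw [step2]
      -- compute the two reads from the processed array
      have hlen1 : (pvDfsB keys left right (pvM left right keys.length (PySem.List.pyGetD left v 0))
          (PySem.List.pyGetD left v 0) a).2.length = keys.length := by
        rw [pvDfsB_length]; exact ha
      have hlen2 : (pvDfsB keys left right (pvM left right keys.length (PySem.List.pyGetD right v 0))
          (PySem.List.pyGetD right v 0)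
          (pvDfsB keys left right (pvM left right keys.length (PySem.List.pyGetD left v 0))
            (PySem.List.pyGetD left v 0) a).2).2.length = keys.length := by
        rw [pvDfsB_length, pvDfsB_length]; exact ha
      have gl? : (pvDfsB keys left right (pvM left right keys.length (PySem.List.pyGetD right v 0))
          (PySem.List.pyGetD right v 0)
          (pvDfsB keys left right (pvM left right keys.length (PySem.List.pyGetD left v 0))
            (PySem.List.pyGetD left v 0) a).2).2[(PySem.List.pyGetD left v 0).toNat]? =
          some (pvS keys left right (PySem.List.pyGetD left v 0)) := by
        have hself := pvDfsB_self keys left right hp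
          (pvM left right keys.length (PySem.List.pyGetD left v 0)) (PySem.List.pyGetD left v 0) a
          hl0 hlR (le_refl _) ha
        have hfr := pvDfsB_frame keys left right hp
          (pvM left right keys.length (PySem.List.pyGetD right v 0)) (PySem.List.pyGetD right v 0)
          (pvDfsB keys left right (pvM left right keys.length (PySem.List.pyGetD left v 0))
            (PySem.List.pyGetD left v 0) a).2
          (PySem.List.pyGetD left v 0).toNat hr0 hrR (le_refl _) hlen1
        rcases hfr with h' | h'
        · rw [h', hself]
        · rw [h', Int.toNat_of_nonneg hl0]
      have gr? : (pvDfsB keys left right (pvM left right keys.length (PySem.List.pyGetD right v 0))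
          (PySem.List.pyGetD right v 0)
          (pvDfsB keys left right (pvM left right keys.length (PySem.List.pyGetD left v 0))
            (PySem.List.pyGetD left v 0) a).2).2[(PySem.List.pyGetD right v 0).toNat]? =
          some (pvS keys left right (PySem.List.pyGetD right v 0)) :=
        pvDfsB_self keys left right hp _ _ _ hr0 hrR (le_refl _) hlen1
      have gl : PySem.List.pyGetD
          (pvDfsB keys left right (pvM left right keys.length (PySem.List.pyGetD right v 0))
            (PySem.List.pyGetD right v 0)
            (pvDfsB keys left right (pvM left right keys.length (PySem.List.pyGetD left v 0))
              (PySem.List.pyGetD left v 0) a).2).2 (PySem.List.pyGetD left v 0) 0 =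
          pvS keys left right (PySem.List.pyGetD left v 0) := by
        rw [PySem.List.pyGetD_eq_getElem _ _ hl0 (by rw [hlen2]; omega)]
        rw [← Option.some_inj, ← List.getElem?_eq_getElem (by rw [hlen2]; omega)]
        exact gl?
      have gr : PySem.List.pyGetD
          (pvDfsB keys left right (pvM left right keys.length (PySem.List.pyGetD right v 0))
            (PySem.List.pyGetD right v 0)
            (pvDfsB keys left right (pvM left right keys.length (PySem.List.pyGetD left v 0))
              (PySem.List.pyGetD left v 0) a).2).2 (PySem.List.pyGetD right v 0) 0 =
          pvS keys left right (PySem.List.pyGetD right v 0) := by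
        rw [PySem.List.pyGetD_eq_getElem _ _ hr0 (by rw [hlen2]; omega)]
        rw [← Option.some_inj, ← List.getElem?_eq_getElem (by rw [hlen2]; omega)]
        exact gr?
      rw [if_pos hl, if_pos hr, gl, gr]
      -- unfold the right-hand dfs at v one level
      rw [hm]
      conv => rhs; rw [pvDfsB]
      simp only [hl, hr, ite_true, if_pos, ne_eq, not_false_eq_true]
      rw [pvDfsB_mono keys left right hp m (pvM left right keys.length (PySem.List.pyGetD left v 0))
        (PySem.List.pyGetD left v 0) a hl0 hlR (by omega) (le_refl _)]
      rw [pvDfsB_mono keys left right hp m (pvM left right keys.length (PySem.List.pyGetD right v 0))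
        (PySem.List.pyGetD right v 0) _ hr0 hrR (by omega) (le_refl _)]
      rw [pvS_eq keys left right hp (pvM left right keys.length (PySem.List.pyGetD left v 0))
        (PySem.List.pyGetD left v 0) a hl0 hlR (le_refl _)]
      rw [pvS_eq keys left right hp (pvM left right keys.length (PySem.List.pyGetD right v 0))
        (PySem.List.pyGetD right v 0) _ hr0 hrR (le_refl _)]
      exact pvRunA_mono keys left right hp f'' (f'' + 1 + 1) _ rest hok (by omega) (by omega)
    -- case l ≠ -1, r = -1
    · obtain ⟨hl0, hLn, hlR, hlM⟩ := hcl.resolve_left hl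
      have hWL : pvWt1 left right keys.length (PySem.List.pyGetD left v 0, 0) =
          4 ^ pvM left right keys.length (PySem.List.pyGetD left v 0) := by unfold pvWt1; simp
      have hbl : 4 ^ pvM left right keys.length (PySem.List.pyGetD left v 0) ≤
          4 ^ (pvM left right keys.length v - 1) := Nat.pow_le_pow_right (by norm_num) (by omega)
      have step0 : pvRunA keys left right (f'' + 1 + 1) a ((v, 0) :: rest) =
          pvRunA keys left right (f'' + 1) a
            ((PySem.List.pyGetD left v 0, 0) :: (v, 1) :: rest) := by
        rw [pvRunA, if_neg (by decide : ¬ ((0 : Int) = 1))]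
        simp [hl, hr]
      rw [step0]
      rw [ih (PySem.List.pyGetD left v 0) a ((v, 1) :: rest) (f'' + 1)
          hl0 hlR (by omega)
          (by
            intro q hq
            simp only [List.mem_cons] at hq
            rcases hq with rfl | hq
            · exact ⟨h0, hv, Or.inr rfl⟩
            · exact hok q hq)
          ha
          (by simp only [pvWt_cons, hWL, hW1]; omega)]
      rw [step2]
      have hlen1 : (pvDfsB keys left right (pvM left right keys.length (PySem.List.pyGetD left v 0))
          (PySem.List.pyGetD left v 0) a).2.length = keys.length := by
        rw [pvDfsB_length]; exact ha
      have gl : PySem.List.pyGetD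
          (pvDfsB keys left right (pvM left right keys.length (PySem.List.pyGetD left v 0))
            (PySem.List.pyGetD left v 0) a).2 (PySem.List.pyGetD left v 0) 0 =
          pvS keys left right (PySem.List.pyGetD left v 0) := by
        rw [PySem.List.pyGetD_eq_getElem _ _ hl0 (by rw [hlen1]; omega)]
        rw [← Option.some_inj, ← List.getElem?_eq_getElem (by rw [hlen1]; omega)]
        exact pvDfsB_self keys left right hp _ _ _ hl0 hlR (le_refl _) ha
      rw [if_pos hl, if_neg hr, gl, add_zero]
      rw [hm]
      conv => rhs; rw [pvDfsB]
      simp only [hl, hr, ite_true, ite_false, if_pos, if_neg, ne_eq, not_false_eq_true,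
        not_true, not_not]
      rw [pvDfsB_mono keys left right hp m (pvM left right keys.length (PySem.List.pyGetD left v 0))
        (PySem.List.pyGetD left v 0) a hl0 hlR (by omega) (le_refl _)]
      rw [pvS_eq keys left right hp (pvM left right keys.length (PySem.List.pyGetD left v 0))
        (PySem.List.pyGetD left v 0) a hl0 hlR (le_refl _)]
      exact pvRunA_mono keys left right hp f'' (f'' + 1 + 1) _ rest hok (by omega) (by omega)
    -- case l = -1, r ≠ -1
    · obtain ⟨hr0, hRn, hrR, hrM⟩ := hcr.resolve_left hr
      have hWR : pvWt1 left right keys.length (PySem.List.pyGetD right v 0, 0) =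
          4 ^ pvM left right keys.length (PySem.List.pyGetD right v 0) := by unfold pvWt1; simp
      have hbr : 4 ^ pvM left right keys.length (PySem.List.pyGetD right v 0) ≤
          4 ^ (pvM left right keys.length v - 1) := Nat.pow_le_pow_right (by norm_num) (by omega)
      have step0 : pvRunA keys left right (f'' + 1 + 1) a ((v, 0) :: rest) =
          pvRunA keys left right (f'' + 1) a
            ((PySem.List.pyGetD right v 0, 0) :: (v, 1) :: rest) := by
        rw [pvRunA, if_neg (by decide : ¬ ((0 : Int) = 1))]
        simp [hl, hr]
      rw [step0]
      rw [ih (PySem.List.pyGetD right v 0) a ((v, 1) :: rest) (f'' + 1)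
          hr0 hrR (by omega)
          (by
            intro q hq
            simp only [List.mem_cons] at hq
            rcases hq with rfl | hq
            · exact ⟨h0, hv, Or.inr rfl⟩
            · exact hok q hq)
          ha
          (by simp only [pvWt_cons, hWR, hW1]; omega)]
      rw [step2]
      have hlen1 : (pvDfsB keys left right (pvM left right keys.length (PySem.List.pyGetD right v 0))
          (PySem.List.pyGetD right v 0) a).2.length = keys.length := by
        rw [pvDfsB_length]; exact ha
      have gr : PySem.List.pyGetD
          (pvDfsB keys left right (pvM left right keys.length (PySem.List.pyGetD right v 0))
            (PySem.List.pyGetD right v 0) a).2 (PySem.List.pyGetD right v 0) 0 =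
          pvS keys left right (PySem.List.pyGetD right v 0) := by
        rw [PySem.List.pyGetD_eq_getElem _ _ hr0 (by rw [hlen1]; omega)]
        rw [← Option.some_inj, ← List.getElem?_eq_getElem (by rw [hlen1]; omega)]
        exact pvDfsB_self keys left right hp _ _ _ hr0 hrR (le_refl _) ha
      rw [if_neg hl, if_pos hr, gr]
      rw [hm]
      conv => rhs; rw [pvDfsB]
      simp only [hl, hr, ite_true, ite_false, if_pos, if_neg, ne_eq, not_false_eq_true,
        not_true, not_not]
      rw [pvDfsB_mono keys left right hp m (pvM left right keys.length (PySem.List.pyGetD right v 0))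
        (PySem.List.pyGetD right v 0) a hr0 hrR (by omega) (le_refl _)]
      rw [pvS_eq keys left right hp (pvM left right keys.length (PySem.List.pyGetD right v 0))
        (PySem.List.pyGetD right v 0) a hr0 hrR (le_refl _)]
      exact pvRunA_mono keys left right hp f'' (f'' + 1 + 1) _ rest hok (by omega) (by omega)
    -- case l = -1, r = -1
    · have step0 : pvRunA keys left right (f'' + 1 + 1) a ((v, 0) :: rest) =
          pvRunA keys left right (f'' + 1) a ((v, 1) :: rest) := by
        rw [pvRunA, if_neg (by decide : ¬ ((0 : Int) = 1))]
        simp [hl, hr]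
      rw [step0, step2]
      rw [if_neg hl, if_neg hr, add_zero]
      rw [hm]
      conv => rhs; rw [pvDfsB]
      simp only [hl, hr, ite_true, ite_false, if_pos, if_neg, ne_eq, not_false_eq_true,
        not_true, not_not]
      exact pvRunA_mono keys left right hp f'' (f'' + 1 + 1) _ rest hok (by omega) (by omega)

-- ===== VERDICT (by name: the statement is the Claim_ definition above) =====
theorem ChampagnePapi21_spec : Claim_equal_ChampagnePapi21 := by
  intro keys left right _ hp
  unfold Spec_ChampagnePapi21 ChampagnePapi21 ChampagnePapi21_alt
  have hn : 0 < keys.length := hp.1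
  have h0R : (0 : Int).toNat ∈ pvDesc left right keys.length 0 :=
    pvDesc_self left right keys.length 0
  have hMle : pvM left right keys.length 0 ≤ keys.length :=
    pvM_le keys left right hp h0R
  have hw : pvWt left right keys.length [((0 : Int), (0 : Int))] =
      4 ^ pvM left right keys.length 0 := by
    simp [pvWt, pvWt1]
  have hpow : 4 ^ pvM left right keys.length 0 ≤ 4 ^ keys.length :=
    Nat.pow_le_pow_right (by norm_num) hMle
  rw [pvRunA_dfs keys left right hp keys.length 0 (List.replicate keys.length 0) []
    (4 ^ keys.length + 1) (by norm_num) h0R hMle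
    (fun q hq => absurd hq (List.not_mem_nil))
    (List.length_replicate) (by rw [hw]; omega)]
  rw [pvRunA_nil]
  rw [pvDfsB_mono keys left right hp (pvM left right keys.length 0) keys.length 0
    (List.replicate keys.length 0) (by norm_num) h0R (le_refl _) hMle]
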